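-- pv_equiv track=rewrite | github.com/ThatAquarel/hep | scintillator_field/display/display_2/Visualizer/useless/test(real).py | interpret_raw_data
-- ===== SOURCE A (Python) =====
-- def interpret_raw_data(bin):
--     x = bin & 3355443   #& operator on 0b001100110011001100110011
--     y = bin & 13421772  #& operator on 0b110011001100110011001100
--
--     bit = 12
--     bitminus2 = bit - 2
--     list_x = []
--     list_y = []
--     for i in range(0, bit, 2):
--         last_two_x = (x >> (i * 2))
--         list_x.append(((last_two_x & 2) >> 1, last_two_x & 1))
--
--         last_two_x = (y >> (i * 2 + 2))
--         list_y.append(((last_two_x & 2) >> 1, last_two_x & 1))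
--
--     return [list_x,list_y]
-- ===== SOURCE B (Python) =====
-- def interpret_raw_data(bin):
--     s = format(bin & 16777215, '024b')
--     list_x = [(int(s[i - 1]), int(s[i])) for i in range(23, -1, -4)]
--     list_y = [(int(s[i - 3]), int(s[i - 2])) for i in range(23, -1, -4)]
--     return [list_x, list_y]
-- ===== Notes on version B (the rewrite author's own statement) =====
-- stated objective: alternative
-- what changed: B converts bin's low 24 bits once into a fixed-width binary string via format(m,'024b') and builds both lists by indexing digit pairs of that string in a backward range, instead of A's per-iteration shift-and-mask extraction from two premasked integers.
import Mathlib
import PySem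

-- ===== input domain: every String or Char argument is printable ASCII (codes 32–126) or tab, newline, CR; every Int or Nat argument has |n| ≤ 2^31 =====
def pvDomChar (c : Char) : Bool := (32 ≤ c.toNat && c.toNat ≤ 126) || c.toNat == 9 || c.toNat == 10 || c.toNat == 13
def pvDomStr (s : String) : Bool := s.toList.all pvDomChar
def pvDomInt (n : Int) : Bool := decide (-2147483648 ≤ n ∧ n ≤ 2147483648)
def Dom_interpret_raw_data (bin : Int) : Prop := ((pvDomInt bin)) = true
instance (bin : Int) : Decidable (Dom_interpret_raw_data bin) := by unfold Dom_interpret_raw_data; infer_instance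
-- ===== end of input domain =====

-- B builds a fixed-width 24-bit binary string of bin's low bits once and reads both lists
-- off that string's digit pairs, replacing A's per-iteration shift-and-mask extraction (objective: alternative).

-- ===== PORT A =====
-- Every shift amount A computes is nonnegative, so '.toNat' is exact here.
def interpret_raw_data (bin : Int) : List (List (Int × Int)) :=
  let x := PySem.Int.band bin 3355443
  let y := PySem.Int.band bin 13421772
  let bit : Int := 12
  -- A's 'bitminus2 = bit - 2' is never used; omitted.
  let st := (PySem.List.pyRange 0 bit 2).foldl
    (fun (st : List (Int × Int) × List (Int × Int)) i =>
      let last_two_x := x >>> ((i * 2).toNat : Nat)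
      let lx := st.1 ++ [((PySem.Int.band last_two_x 2) >>> (1 : Nat), PySem.Int.band last_two_x 1)]
      let last_two_x' := y >>> ((i * 2 + 2).toNat : Nat)   -- A reuses the name last_two_x
      let ly := st.2 ++ [((PySem.Int.band last_two_x' 2) >>> (1 : Nat), PySem.Int.band last_two_x' 1)]
      (lx, ly)) ([], [])
  [st.1, st.2]

-- ===== PORT B =====
-- format(m, '024b') for 0 ≤ m < 2^24: the 24 binary digits of m, most significant first (exact on that range).
def pvBin24 (m : Nat) : List Char := (List.range 24).map (fun j => if m.testBit (23 - j) then '1' else '0')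
-- int(s[i]) where s is a binary string: exact since the digits are '0'/'1' and i is always in range in Source B.
def pvBitAt (s : List Char) (i : Int) : Int := if PySem.List.pyGet? s i = some '1' then 1 else 0
def interpret_raw_data_alt (bin : Int) : List (List (Int × Int)) :=
  let s := pvBin24 (PySem.Int.band bin 16777215).toNat
  let list_x := (PySem.List.pyRange 23 (-1) (-4)).map (fun i => (pvBitAt s (i - 1), pvBitAt s i))
  let list_y := (PySem.List.pyRange 23 (-1) (-4)).map (fun i => (pvBitAt s (i - 3), pvBitAt s (i - 2)))
  [list_x, list_y]

-- ===== PRECONDITION & SPEC =====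
def Spec_interpret_raw_data (bin : Int) (out : List (List (Int × Int))) : Prop := out = interpret_raw_data_alt bin
instance (bin : Int) (out : List (List (Int × Int))) : Decidable (Spec_interpret_raw_data bin out) := by unfold Spec_interpret_raw_data; infer_instance

-- ===== CLAIM (what is proved, stated in full; the proofs are below) =====
def Claim_equal_interpret_raw_data : Prop := ∀ (bin : Int), Dom_interpret_raw_data bin → Spec_interpret_raw_data bin (interpret_raw_data bin)

-- ===== LEMMAS AND PROOFS =====

theorem pv_shift_natCast (n j : Nat) : ((n : Int) >>> j) = ((n >>> j : Nat) : Int) := by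
  simp [Int.shiftRight_eq_div_pow, Nat.shiftRight_eq_div_pow]

theorem pv_shift_neg (m j : Nat) : ((-(m : Int) - 1) >>> j) = -((m >>> j : Nat) : Int) - 1 := by
  rw [Int.shiftRight_eq_div_pow, Nat.shiftRight_eq_div_pow]
  have hdm : (2:Int)^j * ((m / 2^j : Nat) : Int) + ((m % 2^j : Nat) : Int) = (m : Int) := by
    exact_mod_cast Nat.div_add_mod m (2^j)
  have hlt : ((m % 2^j : Nat) : Int) < 2^j := by
    exact_mod_cast Nat.mod_lt _ (by positivity)
  have hge : (0:Int) ≤ ((m % 2^j : Nat) : Int) := by positivity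
  have h2 : (0:Int) < 2^j := by positivity
  have key := (Int.ediv_emod_unique (a := -(m:Int) - 1)
      (q := -((m / 2^j : Nat) : Int) - 1) (r := 2^j - 1 - ((m % 2^j : Nat) : Int)) h2).mpr
      ⟨by linarith, by linarith, by linarith⟩
  push_cast
  push_cast at key
  exact key.1

-- bit j of an Int/Nat, as the integer (x >>> j) % 2

theorem pv_bit_natCast (n j : Nat) : ((n : Int) >>> j) % 2 = ((n.testBit j).toNat : Int) := by
  rw [pv_shift_natCast, Nat.toNat_testBit, Nat.shiftRight_eq_div_pow]
  push_cast
  omega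

theorem pv_bit_neg (m j : Nat) : ((-(m : Int) - 1) >>> j) % 2 = 1 - ((m.testBit j).toNat : Int) := by
  rw [pv_shift_neg, Nat.toNat_testBit, Nat.shiftRight_eq_div_pow]
  push_cast
  omega

-- (p &&& q) + ldiff p q = p, by binary induction
theorem pv_and_add_ldiff (p q : Nat) : (p &&& q) + Nat.ldiff p q = p := by
  induction p using Nat.strong_induction_on generalizing q with
  | _ p ih =>
    rcases Nat.eq_zero_or_pos p with hp | hp
    · subst hp
      have h0 : (0 &&& q) = 0 := Nat.zero_and q
      have h1 : Nat.ldiff 0 q = 0 := by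
        apply Nat.eq_of_testBit_eq
        intro i
        simp [Nat.testBit_ldiff]
      omega
    · have hand2 : (p &&& q) / 2 = (p / 2) &&& (q / 2) := by
        have := Nat.shiftRight_and_distrib (i := 1) (a := p) (b := q)
        simpa [Nat.shiftRight_eq_div_pow] using this
      have handm : (p &&& q) % 2 = min (p % 2) (q % 2) := by
        have h := Nat.toNat_testBit (p &&& q) 0
        rw [Nat.testBit_and] at h
        have hp0 := Nat.toNat_testBit p 0
        have hq0 := Nat.toNat_testBit q 0
        simp only [pow_zero, Nat.div_one] at h hp0 hq0
        cases hbp : p.testBit 0 <;> cases hbq : q.testBit 0 <;>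
          rw [hbp] at hp0 h <;> rw [hbq] at hq0 h <;> simp at h hp0 hq0 <;> omega
      have hld2 : (Nat.ldiff p q) / 2 = Nat.ldiff (p / 2) (q / 2) := by
        have : (Nat.ldiff p q) >>> 1 = Nat.ldiff (p >>> 1) (q >>> 1) := by
          apply Nat.eq_of_testBit_eq
          intro i
          simp [Nat.testBit_ldiff, Nat.testBit_shiftRight]
        simpa [Nat.shiftRight_eq_div_pow] using this
      have hldm : (Nat.ldiff p q) % 2 = min (p % 2) (1 - q % 2) := by
        have h := Nat.toNat_testBit (Nat.ldiff p q) 0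
        rw [Nat.testBit_ldiff] at h
        have hp0 := Nat.toNat_testBit p 0
        have hq0 := Nat.toNat_testBit q 0
        simp only [pow_zero, Nat.div_one] at h hp0 hq0
        cases hbp : p.testBit 0 <;> cases hbq : q.testBit 0 <;>
          rw [hbp] at hp0 h <;> rw [hbq] at hq0 h <;> simp at h hp0 hq0 <;> omega
      have ihp := ih (p / 2) (by omega) (q / 2)
      omega

-- bit j of a Python bitwise AND is the product of the bits
theorem pv_bit_band (a b : Int) (j : Nat) :
    (PySem.Int.band a b >>> j) % 2 = ((a >>> j) % 2) * ((b >>> j) % 2) := by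
  rw [PySem.Int.band.eq_1]
  by_cases ha : 0 ≤ a <;> by_cases hb : 0 ≤ b
  · obtain ⟨n, rfl⟩ := Int.eq_ofNat_of_zero_le ha
    obtain ⟨m, rfl⟩ := Int.eq_ofNat_of_zero_le hb
    simp only [if_pos ha, if_pos hb, Int.toNat_natCast]
    rw [pv_bit_natCast, pv_bit_natCast, pv_bit_natCast, Nat.testBit_and]
    cases hn : n.testBit j <;> cases hm : m.testBit j <;> simp
  · obtain ⟨n, rfl⟩ := Int.eq_ofNat_of_zero_le ha
    set m := (-b - 1).toNat with hm
    have hb' : b = -(m : Int) - 1 := by omega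
    simp only [if_pos ha, if_neg hb, Int.toNat_natCast]
    have hsub : n - (n &&& m) = Nat.ldiff n m := by
      have := pv_and_add_ldiff n m
      omega
    rw [hsub, hb', pv_bit_natCast, pv_bit_natCast, pv_bit_neg, Nat.testBit_ldiff]
    cases hn : n.testBit j <;> cases hmm : m.testBit j <;> simp
  · obtain ⟨n, rfl⟩ := Int.eq_ofNat_of_zero_le hb
    set m := (-a - 1).toNat with hm
    have ha' : a = -(m : Int) - 1 := by omega
    simp only [if_neg ha, if_pos hb, Int.toNat_natCast]
    have hsub : n - (n &&& m) = Nat.ldiff n m := by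
      have := pv_and_add_ldiff n m
      omega
    rw [hsub, ha', pv_bit_natCast, pv_bit_natCast, pv_bit_neg, Nat.testBit_ldiff]
    cases hn : n.testBit j <;> cases hmm : m.testBit j <;> simp
  · set m := (-a - 1).toNat with hm
    set n := (-b - 1).toNat with hn
    have ha' : a = -(m : Int) - 1 := by omega
    have hb' : b = -(n : Int) - 1 := by omega
    simp only [if_neg ha, if_neg hb]
    rw [ha', hb', show (-(((m ||| n : Nat)) : Int) - 1) = (-(((m ||| n : Nat)) : Int) - 1) from rfl]
    rw [pv_bit_neg, pv_bit_neg, pv_bit_neg, Nat.testBit_or]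
    cases hmm : m.testBit j <;> cases hnn : n.testBit j <;> simp

-- a & 2 = 2 * (bit 1 of a);  a & 1 = bit 0 of a
theorem pv_band_two (a : Int) : PySem.Int.band a 2 = 2 * ((a >>> (1 : Nat)) % 2) := by
  rw [PySem.Int.band.eq_1]
  by_cases ha : 0 ≤ a
  · obtain ⟨n, rfl⟩ := Int.eq_ofNat_of_zero_le ha
    simp only [if_pos ha, if_pos (show (0:Int) ≤ 2 by norm_num), Int.toNat_natCast]
    rw [pv_bit_natCast]
    have h2 : (2 : Int).toNat = 2 := rfl
    rw [h2]
    have : n &&& 2 = (n.testBit 1).toNat * 2 := by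
      simpa using Nat.and_two_pow n 1
    rw [this]
    cases hn : n.testBit 1 <;> simp
  · set m := (-a - 1).toNat with hm
    have ha' : a = -(m : Int) - 1 := by omega
    simp only [if_neg ha, if_pos (show (0:Int) ≤ 2 by norm_num)]
    rw [ha', pv_bit_neg]
    have h2 : (2 : Int).toNat = 2 := rfl
    rw [h2]
    have : (2 &&& m) = (m.testBit 1).toNat * 2 := by
      rw [Nat.and_comm]
      simpa using Nat.and_two_pow m 1
    rw [this]
    cases hmm : m.testBit 1 <;> simp

theorem pv_band_one (a : Int) : PySem.Int.band a 1 = (a >>> (0 : Nat)) % 2 := by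
  rw [PySem.Int.band.eq_1]
  by_cases ha : 0 ≤ a
  · obtain ⟨n, rfl⟩ := Int.eq_ofNat_of_zero_le ha
    simp only [if_pos ha, if_pos (show (0:Int) ≤ 1 by norm_num), Int.toNat_natCast]
    rw [pv_bit_natCast]
    have h1 : (1 : Int).toNat = 1 := rfl
    rw [h1, Nat.and_one_is_mod, Nat.toNat_testBit]
    simp
  · set m := (-a - 1).toNat with hm
    have ha' : a = -(m : Int) - 1 := by omega
    simp only [if_neg ha, if_pos (show (0:Int) ≤ 1 by norm_num)]
    rw [ha', pv_bit_neg]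
    have h1 : (1 : Int).toNat = 1 := rfl
    rw [h1, Nat.and_comm, Nat.and_one_is_mod, Nat.toNat_testBit]
    simp only [pow_zero, Nat.div_one]
    omega

theorem pv_shift_add (a : Int) (s j : Nat) : (a >>> s) >>> j = a >>> (s + j) := by
  rw [Int.shiftRight_eq_div_pow, Int.shiftRight_eq_div_pow, Int.shiftRight_eq_div_pow]
  push_cast
  rw [Int.ediv_ediv_of_nonneg (by positivity), ← pow_add]

theorem pv_two_mul_shr (t : Int) : (2 * t) >>> (1 : Nat) = t := by
  rw [Int.shiftRight_eq_div_pow]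
  omega

-- B-side: the binary-string digit at index i is bit (23 - i) of the masked value, i.e. bit j of bin
theorem pv_band_nonneg (a : Int) : 0 ≤ PySem.Int.band a 16777215 := by
  rw [PySem.Int.band.eq_1]
  split_ifs <;> first | positivity | omega

theorem pvBitAt_bin24 (m : Nat) (i : Int) (h0 : 0 ≤ i) (h : i < 24) :
    pvBitAt (pvBin24 m) i = ((m.testBit (23 - i.toNat)).toNat : Int) := by
  unfold pvBitAt pvBin24
  rw [PySem.List.pyGet?_of_nonneg _ h0]
  have hlt : i.toNat < 24 := by omega
  rw [List.getElem?_map, List.getElem?_range hlt]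
  cases hb : m.testBit (23 - i.toNat) <;> simp [hb]

theorem pv_mask24_bit (j : Nat) (h : j < 24) : ((16777215 : Int) >>> j) % 2 = 1 := by
  interval_cases j <;> decide

theorem pvB_bit (bin : Int) (i : Int) (j : Nat) (h0 : 0 ≤ i) (h : i < 24) (hj : 23 - i.toNat = j) :
    pvBitAt (pvBin24 (PySem.Int.band bin 16777215).toNat) i = (bin >>> j) % 2 := by
  rw [pvBitAt_bin24 _ i h0 h, hj, ← pv_bit_natCast,
    Int.toNat_of_nonneg (pv_band_nonneg bin), pv_bit_band,
    pv_mask24_bit j (by omega), mul_one]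

-- ===== VERDICT (by name: the statement is the Claim_ definition above) =====
theorem interpret_raw_data_spec : Claim_equal_interpret_raw_data := by
  intro bin _
  unfold Spec_interpret_raw_data interpret_raw_data interpret_raw_data_alt
  have hr12 : PySem.List.pyRange 0 12 2 = [0, 2, 4, 6, 8, 10] := by decide
  have hr : PySem.List.pyRange 23 (-1) (-4) = [23, 19, 15, 11, 7, 3] := by decide
  simp only [hr12, hr, List.foldl, List.map]
  simp only [pv_band_two, pv_band_one, pv_two_mul_shr, pv_shift_add, pv_bit_band]
  rw [show ((23 : Int) - 1) = 22 from rfl, show ((23 : Int) - 3) = 20 from rfl,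
    show ((23 : Int) - 2) = 21 from rfl, show ((19 : Int) - 1) = 18 from rfl,
    show ((19 : Int) - 3) = 16 from rfl, show ((19 : Int) - 2) = 17 from rfl,
    show ((15 : Int) - 1) = 14 from rfl, show ((15 : Int) - 3) = 12 from rfl,
    show ((15 : Int) - 2) = 13 from rfl, show ((11 : Int) - 1) = 10 from rfl,
    show ((11 : Int) - 3) = 8 from rfl, show ((11 : Int) - 2) = 9 from rfl,
    show ((7 : Int) - 1) = 6 from rfl, show ((7 : Int) - 3) = 4 from rfl,
    show ((7 : Int) - 2) = 5 from rfl, show ((3 : Int) - 1) = 2 from rfl,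
    show ((3 : Int) - 3) = 0 from rfl, show ((3 : Int) - 2) = 1 from rfl]
  rw [pvB_bit bin 22 1 (by norm_num) (by norm_num) (by decide),
    pvB_bit bin 23 0 (by norm_num) (by norm_num) (by decide),
    pvB_bit bin 18 5 (by norm_num) (by norm_num) (by decide),
    pvB_bit bin 19 4 (by norm_num) (by norm_num) (by decide),
    pvB_bit bin 14 9 (by norm_num) (by norm_num) (by decide),
    pvB_bit bin 15 8 (by norm_num) (by norm_num) (by decide),
    pvB_bit bin 10 13 (by norm_num) (by norm_num) (by decide),
    pvB_bit bin 11 12 (by norm_num) (by norm_num) (by decide),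
    pvB_bit bin 6 17 (by norm_num) (by norm_num) (by decide),
    pvB_bit bin 7 16 (by norm_num) (by norm_num) (by decide),
    pvB_bit bin 2 21 (by norm_num) (by norm_num) (by decide),
    pvB_bit bin 3 20 (by norm_num) (by norm_num) (by decide),
    pvB_bit bin 20 3 (by norm_num) (by norm_num) (by decide),
    pvB_bit bin 21 2 (by norm_num) (by norm_num) (by decide),
    pvB_bit bin 16 7 (by norm_num) (by norm_num) (by decide),
    pvB_bit bin 17 6 (by norm_num) (by norm_num) (by decide),
    pvB_bit bin 12 11 (by norm_num) (by norm_num) (by decide),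
    pvB_bit bin 13 10 (by norm_num) (by norm_num) (by decide),
    pvB_bit bin 8 15 (by norm_num) (by norm_num) (by decide),
    pvB_bit bin 9 14 (by norm_num) (by norm_num) (by decide),
    pvB_bit bin 4 19 (by norm_num) (by norm_num) (by decide),
    pvB_bit bin 5 18 (by norm_num) (by norm_num) (by decide),
    pvB_bit bin 0 23 (by norm_num) (by norm_num) (by decide),
    pvB_bit bin 1 22 (by norm_num) (by norm_num) (by decide)]
  norm_num [Int.shiftRight_eq_div_pow, show Int.toNat 4 = 4 from rfl, show Int.toNat 2 = 2 from rfl, show Int.toNat 6 = 6 from rfl, show Int.toNat 8 = 8 from rfl, show Int.toNat 10 = 10 from rfl, show Int.toNat 12 = 12 from rfl, show Int.toNat 14 = 14 from rfl, show Int.toNat 16 = 16 from rfl, show Int.toNat 18 = 18 from rfl, show Int.toNat 20 = 20 from rfl, show Int.toNat 22 = 22 from rfl]
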